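-- pv_equiv track=rewrite | github.com/jmcdonough98/aoc | 2024/day06/6.py | walkGuard
-- ===== SOURCE A (Python) =====
-- def walkGuard(height, width, wallPos, guardPos):
--     dirs = [(-1,0),(0,1),(1,0),(0,-1)]
--     currDir = 0
--     visited = set()
--     while 0 <= guardPos[0] < height and 0 <= guardPos[1] < width:
--         if (guardPos, currDir) in visited:
--             return True, None
--         visited.add((guardPos,currDir))
--         tmp = (guardPos[0] + dirs[currDir][0], guardPos[1] + dirs[currDir][1])
--         if tmp in wallPos:
--             currDir = (currDir + 1) % 4
--         else:
--             guardPos = tmp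
--     return False, len(set(x[0] for x in visited))
-- ===== SOURCE B (Python) =====
-- def walkGuard(height, width, wallPos, guardPos):
--     walls = set(wallPos)
--     dirs = [(-1, 0), (0, 1), (1, 0), (0, -1)]
--
--     def inb(s):
--         return 0 <= s[0][0] < height and 0 <= s[0][1] < width
--
--     def step(s):
--         (r, c), d = s
--         nxt = (r + dirs[d][0], c + dirs[d][1])
--         if nxt in walls:
--             return ((r, c), (d + 1) % 4)
--         return (nxt, d)
--
--     start = (guardPos, 0)
--     # Phase 1: Floyd tortoise/hare cycle detection, no visited-state set.
--     if inb(start):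
--         tort = hare = start
--         while True:
--             hare = step(hare)
--             if not inb(hare):
--                 break
--             hare = step(hare)
--             if not inb(hare):
--                 break
--             tort = step(tort)
--             if tort == hare:
--                 return True, None
--     # Phase 2: the walk provably exits; count distinct cells in one plain pass.
--     cells = set()
--     s = start
--     while inb(s):
--         cells.add(s[0])
--         s = step(s)
--     return False, len(cells)
-- ===== Notes on version B (the rewrite author's own statement) =====
-- stated objective: alternative
-- what changed: B replaces A's visited-(position,direction)-set loop detection by Floyd tortoise/hare cycle detection over a pure step function (walls put in a set once), then counts distinct cells in one plain second walk only when the guard provably exits.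
import Mathlib
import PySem

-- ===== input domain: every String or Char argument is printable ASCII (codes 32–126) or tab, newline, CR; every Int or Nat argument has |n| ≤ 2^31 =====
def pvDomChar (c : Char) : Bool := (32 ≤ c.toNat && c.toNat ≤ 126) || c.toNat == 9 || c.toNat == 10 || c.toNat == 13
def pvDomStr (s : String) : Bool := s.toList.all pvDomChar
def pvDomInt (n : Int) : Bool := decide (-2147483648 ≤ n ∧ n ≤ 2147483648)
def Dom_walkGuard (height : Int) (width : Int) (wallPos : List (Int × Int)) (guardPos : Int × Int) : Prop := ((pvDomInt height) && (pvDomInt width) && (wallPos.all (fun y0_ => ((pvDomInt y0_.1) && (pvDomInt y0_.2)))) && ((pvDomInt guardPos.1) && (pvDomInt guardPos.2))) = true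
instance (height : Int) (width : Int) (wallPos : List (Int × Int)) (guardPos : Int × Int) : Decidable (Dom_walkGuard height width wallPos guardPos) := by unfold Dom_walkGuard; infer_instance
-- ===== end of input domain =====

-- B replaces A's visited-(position,direction)-set loop detection by Floyd tortoise/hare cycle
-- detection over a pure step function (walls put in a set once), then counts distinct cells in a
-- plain second walk; objective: alternative algorithm, no visited-state set.

-- ===== PORT A =====
def wgDirsA : List (Int × Int) := [(-1, 0), (0, 1), (1, 0), (0, -1)]

-- A's while-loop as fuel recursion; every iteration either returns or inserts a NEW in-bounds
-- (position, direction) state into `visited`, so the fuel provided below is never exhausted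
-- (proved in the lemmas); the fuel-out branch repeats the loop's normal-exit expression.
def wgLoopA (height width : Int) (wallPos : List (Int × Int)) :
    Nat → (Int × Int) → Int → PySem.Set ((Int × Int) × Int) → Bool × Option Int
  | 0, _, _, visited =>
      (false, some (PySem.Set.len (PySem.Set.ofList (visited.map Prod.fst))))
  | fuel + 1, guardPos, currDir, visited =>
      if 0 ≤ guardPos.1 ∧ guardPos.1 < height ∧ 0 ≤ guardPos.2 ∧ guardPos.2 < width then
        if PySem.Set.contains visited (guardPos, currDir) then (true, none)
        else
          let visited' := PySem.Set.add visited (guardPos, currDir)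
          let d := (PySem.List.pyGet? wgDirsA currDir).getD (0, 0)  -- currDir ∈ [0,4): never misses
          let tmp := (guardPos.1 + d.1, guardPos.2 + d.2)
          if tmp ∈ wallPos then
            wgLoopA height width wallPos fuel guardPos (PySem.Int.mod (currDir + 1) 4) visited'
          else
            wgLoopA height width wallPos fuel tmp currDir visited'
      else (false, some (PySem.Set.len (PySem.Set.ofList (visited.map Prod.fst))))

def walkGuard (height : Int) (width : Int) (wallPos : List (Int × Int)) (guardPos : Int × Int) : Bool × Option Int :=
  wgLoopA height width wallPos ((4 * height * width).toNat + 2) guardPos 0 PySem.Set.empty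

-- ===== PORT B =====
def wgDirsB : List (Int × Int) := [(-1, 0), (0, 1), (1, 0), (0, -1)]

def wgInb (height width : Int) (s : (Int × Int) × Int) : Bool :=
  decide (0 ≤ s.1.1 ∧ s.1.1 < height ∧ 0 ≤ s.1.2 ∧ s.1.2 < width)

def wgStep (walls : PySem.Set (Int × Int)) (s : (Int × Int) × Int) : (Int × Int) × Int :=
  let d := (PySem.List.pyGet? wgDirsB s.2).getD (0, 0)  -- direction ∈ [0,4): never misses
  let nxt := (s.1.1 + d.1, s.1.2 + d.2)
  if PySem.Set.contains walls nxt then (s.1, PySem.Int.mod (s.2 + 1) 4) else (nxt, s.2)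

-- Phase 1 (Floyd): hare moves two steps, tortoise one; a meeting means a loop.  The `while True`
-- loop as fuel recursion; the fuel-out value false is never the result of insufficient fuel for
-- the fuel provided below (proved in the lemmas).
def wgFloyd (height width : Int) (walls : PySem.Set (Int × Int)) :
    Nat → (Int × Int) × Int → (Int × Int) × Int → Bool
  | 0, _, _ => false
  | fuel + 1, tort, hare =>
      let hare1 := wgStep walls hare
      if wgInb height width hare1 then
        let hare2 := wgStep walls hare1
        if wgInb height width hare2 then
          let tort1 := wgStep walls tort
          if tort1 = hare2 then true
          else wgFloyd height width walls fuel tort1 hare2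
        else false
      else false

-- Phase 2: the walk provably exits; count distinct cells in one plain pass.
def wgCount (height width : Int) (walls : PySem.Set (Int × Int)) :
    Nat → (Int × Int) × Int → PySem.Set (Int × Int) → Bool × Option Int
  | 0, _, cells => (false, some (PySem.Set.len cells))
  | fuel + 1, s, cells =>
      if wgInb height width s then
        wgCount height width walls fuel (wgStep walls s) (PySem.Set.add cells s.1)
      else (false, some (PySem.Set.len cells))

def walkGuard_alt (height : Int) (width : Int) (wallPos : List (Int × Int)) (guardPos : Int × Int) : Bool × Option Int :=
  let walls : PySem.Set (Int × Int) := PySem.Set.ofList wallPos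
  let start : (Int × Int) × Int := (guardPos, 0)
  let fuel : Nat := (4 * height * width).toNat + 2
  if wgInb height width start then
    if wgFloyd height width walls fuel start start then (true, none)
    else wgCount height width walls fuel start PySem.Set.empty
  else wgCount height width walls fuel start PySem.Set.empty

-- ===== PRECONDITION & SPEC =====
def Spec_walkGuard (height : Int) (width : Int) (wallPos : List (Int × Int)) (guardPos : Int × Int) (out : Bool × Option Int) : Prop := out = walkGuard_alt height width wallPos guardPos
instance (height : Int) (width : Int) (wallPos : List (Int × Int)) (guardPos : Int × Int) (out : Bool × Option Int) : Decidable (Spec_walkGuard height width wallPos guardPos out) := by unfold Spec_walkGuard; infer_instance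

-- ===== CLAIM (what is proved, stated in full; the proofs are below) =====
def Claim_equal_walkGuard : Prop := ∀ (height : Int) (width : Int) (wallPos : List (Int × Int)) (guardPos : Int × Int), Dom_walkGuard height width wallPos guardPos → Spec_walkGuard height width wallPos guardPos (walkGuard height width wallPos guardPos)

-- ===== LEMMAS AND PROOFS =====

-- The pure orbit of the step function: the guard's state after n steps.
def wgOrbit (W : PySem.Set (Int × Int)) (s0 : (Int × Int) × Int) (n : Nat) : (Int × Int) × Int :=
  (wgStep W)^[n] s0

def wgOrbitL (W : PySem.Set (Int × Int)) (s0 : (Int × Int) × Int) (n : Nat) : List ((Int × Int) × Int) :=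
  (List.range n).map (wgOrbit W s0)

theorem wgOrbit_succ (W : PySem.Set (Int × Int)) (s0 : (Int × Int) × Int) (n : Nat) :
    wgOrbit W s0 (n + 1) = wgStep W (wgOrbit W s0 n) := by
  simp [wgOrbit, Function.iterate_succ_apply']

theorem wgOrbitL_succ (W : PySem.Set (Int × Int)) (s0 : (Int × Int) × Int) (n : Nat) :
    wgOrbitL W s0 (n + 1) = wgOrbitL W s0 n ++ [wgOrbit W s0 n] := by
  simp [wgOrbitL, List.range_succ]

theorem wgStep_dir (W : PySem.Set (Int × Int)) (s : (Int × Int) × Int)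
    (hd : 0 ≤ s.2 ∧ s.2 < 4) : 0 ≤ (wgStep W s).2 ∧ (wgStep W s).2 < 4 := by
  simp only [wgStep]
  split
  · constructor
    · simpa [PySem.Int.mod_eq_emod_of_pos (by norm_num : (0:Int) < 4)] using
        Int.emod_nonneg (s.2+1) (by norm_num)
    · simpa [PySem.Int.mod_eq_emod_of_pos (by norm_num : (0:Int) < 4)] using
        Int.emod_lt_of_pos (s.2+1) (by norm_num : (0:Int) < 4)
  · exact hd

theorem wgOrbit_dir (W : PySem.Set (Int × Int)) (g : Int × Int) (n : Nat) :
    0 ≤ (wgOrbit W (g, 0) n).2 ∧ (wgOrbit W (g, 0) n).2 < 4 := by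
  induction n with
  | zero => constructor <;> simp [wgOrbit]
  | succ n ih => rw [wgOrbit_succ]; exact wgStep_dir W _ ih

theorem wgOrbit_add (W : PySem.Set (Int × Int)) (s0 : (Int × Int) × Int) (m n : Nat) :
    wgOrbit W s0 (m + n) = (wgStep W)^[m] (wgOrbit W s0 n) := by
  simp [wgOrbit, Function.iterate_add_apply]

-- Periodicity: a repeated state makes the orbit periodic from there on.
theorem wgOrbit_period (W : PySem.Set (Int × Int)) (s0 : (Int × Int) × Int) (i j : Nat)
    (hij : i < j) (heq : wgOrbit W s0 i = wgOrbit W s0 j) :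
    ∀ m, i ≤ m → wgOrbit W s0 (m + (j - i)) = wgOrbit W s0 m := by
  intro m hm
  have h1 : m + (j - i) = (m - i) + j := by omega
  have h2 : m = (m - i) + i := by omega
  rw [h1, wgOrbit_add, ← heq, ← wgOrbit_add, ← h2]

theorem wgOrbit_period_mul (W : PySem.Set (Int × Int)) (s0 : (Int × Int) × Int) (i j : Nat)
    (hij : i < j) (heq : wgOrbit W s0 i = wgOrbit W s0 j) :
    ∀ q m, i ≤ m → wgOrbit W s0 (m + q * (j - i)) = wgOrbit W s0 m := by
  intro q
  induction q with
  | zero => simp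
  | succ q ih =>
      intro m hm
      have h1 : m + (q + 1) * (j - i) = (m + q * (j - i)) + (j - i) := by ring
      rw [h1, wgOrbit_period W s0 i j hij heq _ (by omega), ih m hm]

-- A repeated state whose whole prefix is in bounds keeps the guard in bounds forever.
theorem wgLoops_of_repeat (h w : Int) (W : PySem.Set (Int × Int)) (s0 : (Int × Int) × Int)
    (i j : Nat) (hij : i < j) (heq : wgOrbit W s0 i = wgOrbit W s0 j)
    (hpre : ∀ k, k < j → wgInb h w (wgOrbit W s0 k) = true) :
    ∀ n, wgInb h w (wgOrbit W s0 n) = true := by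
  intro n
  by_cases hn : n < j
  · exact hpre n hn
  · have hp : 0 < j - i := by omega
    have hmod := Nat.mod_lt (n - i) hp
    have hdm := Nat.div_add_mod (n - i) (j - i)
    have hcm : (n - i) / (j - i) * (j - i) = (j - i) * ((n - i) / (j - i)) := Nat.mul_comm _ _
    have hn2 : n = (i + (n - i) % (j - i)) + ((n - i) / (j - i)) * (j - i) := by omega
    rw [hn2, wgOrbit_period_mul W s0 i j hij heq ((n - i) / (j - i))
      (i + (n - i) % (j - i)) (Nat.le_add_right _ _)]
    exact hpre _ (by omega)

-- Pigeonhole: if the guard never leaves the h×w board, some state repeats within h*w*4 steps.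
theorem wgExists_repeat (h w : Int) (W : PySem.Set (Int × Int)) (g : Int × Int)
    (hL : ∀ n, wgInb h w (wgOrbit W (g, 0) n) = true) :
    ∃ i j, i < j ∧ j ≤ h.toNat * w.toNat * 4 ∧ wgOrbit W (g, 0) i = wgOrbit W (g, 0) j := by
  have hmaps : ∀ k ∈ Finset.range (h.toNat * w.toNat * 4 + 1),
      wgOrbit W (g, 0) k ∈ ((Finset.Ico (0:ℤ) h ×ˢ Finset.Ico (0:ℤ) w) ×ˢ Finset.Ico (0:ℤ) 4) := by
    intro k _
    have hb := hL k
    have hd := wgOrbit_dir W g k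
    simp only [wgInb, decide_eq_true_eq] at hb
    simp only [Finset.mem_product, Finset.mem_Ico]
    exact ⟨⟨⟨hb.1, hb.2.1⟩, ⟨hb.2.2.1, hb.2.2.2⟩⟩, hd⟩
  have hcard : ((Finset.Ico (0:ℤ) h ×ˢ Finset.Ico (0:ℤ) w) ×ˢ Finset.Ico (0:ℤ) 4).card <
      (Finset.range (h.toNat * w.toNat * 4 + 1)).card := by
    simp [Finset.card_product, Int.card_Ico]
  obtain ⟨a, ha, b, hb, hne, heq⟩ :=
    Finset.exists_ne_map_eq_of_card_lt_of_maps_to hcard hmaps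
  simp only [Finset.mem_range] at ha hb
  rcases Nat.lt_or_ge a b with hab | hab
  · exact ⟨a, b, hab, by omega, heq⟩
  · exact ⟨b, a, by omega, by omega, heq.symm⟩

-- If the guard exits at step N, the first N states are pairwise distinct, hence N ≤ h*w*4.
theorem wgExit_bound (h w : Int) (W : PySem.Set (Int × Int)) (g : Int × Int) (N : Nat)
    (hpre : ∀ k, k < N → wgInb h w (wgOrbit W (g, 0) k) = true)
    (hnr : ∀ i j, i < j → j < N → wgOrbit W (g, 0) i ≠ wgOrbit W (g, 0) j) :
    N ≤ h.toNat * w.toNat * 4 := by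
  have hmaps : ∀ k ∈ Finset.range N,
      wgOrbit W (g, 0) k ∈ ((Finset.Ico (0:ℤ) h ×ˢ Finset.Ico (0:ℤ) w) ×ˢ Finset.Ico (0:ℤ) 4) := by
    intro k hk
    simp only [Finset.mem_range] at hk
    have hb := hpre k hk
    have hd := wgOrbit_dir W g k
    simp only [wgInb, decide_eq_true_eq] at hb
    simp only [Finset.mem_product, Finset.mem_Ico]
    exact ⟨⟨⟨hb.1, hb.2.1⟩, ⟨hb.2.2.1, hb.2.2.2⟩⟩, hd⟩
  have hinj : Set.InjOn (wgOrbit W (g, 0)) (Finset.range N) := by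
    intro a ha b hb hab
    simp only [Finset.coe_range, Set.mem_Iio] at ha hb
    by_contra hne
    rcases Nat.lt_or_ge a b with h1 | h1
    · exact hnr a b h1 hb hab
    · exact hnr b a (by omega) ha hab.symm
  have := Finset.card_le_card_of_injOn (wgOrbit W (g, 0)) hmaps hinj
  simpa [Finset.card_product, Int.card_Ico] using this

theorem wgFuel_ge (h w : Int) (hh : 0 < h) (hw : 0 < w) :
    (4 * h * w).toNat + 2 = h.toNat * w.toNat * 4 + 2 := by
  have h4 : 4 * h * w = ((4 * h.toNat * w.toNat : Nat) : Int) := by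
    push_cast [Int.toNat_of_nonneg hh.le, Int.toNat_of_nonneg hw.le]; ring
  rw [h4, Int.toNat_natCast]; ring

-- One unfolding of A's loop, phrased through B's pure step function.
theorem wgLoopA_succ (h w : Int) (wp : List (Int × Int)) (fuel : Nat) (s : (Int × Int) × Int)
    (v : PySem.Set ((Int × Int) × Int)) :
    wgLoopA h w wp (fuel + 1) s.1 s.2 v =
      if wgInb h w s then
        if s ∈ v then (true, none)
        else
          wgLoopA h w wp fuel (wgStep (PySem.Set.ofList wp) s).1 (wgStep (PySem.Set.ofList wp) s).2
            (PySem.Set.add v s)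
      else (false, some (PySem.Set.len (PySem.Set.ofList (v.map Prod.fst)))) := by
  rcases s with ⟨pos, d⟩
  simp only [wgLoopA, wgStep, wgInb, wgDirsA, wgDirsB, PySem.Set.contains_iff,
    PySem.Set.mem_ofList, decide_eq_true_eq]
  split_ifs <;> rfl

-- A's loop when the guard exits at step N (no repeat happens first).
theorem wgLoopA_exit (h w : Int) (wp : List (Int × Int)) (s0 : (Int × Int) × Int) (N : Nat)
    (hN : wgInb h w (wgOrbit (PySem.Set.ofList wp) s0 N) = false)
    (hpre : ∀ k, k < N → wgInb h w (wgOrbit (PySem.Set.ofList wp) s0 k) = true)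
    (hnr : ∀ i j, i < j → j < N → wgOrbit (PySem.Set.ofList wp) s0 i ≠ wgOrbit (PySem.Set.ofList wp) s0 j) :
    ∀ fuel n, n ≤ N → N - n < fuel →
      wgLoopA h w wp fuel (wgOrbit (PySem.Set.ofList wp) s0 n).1 (wgOrbit (PySem.Set.ofList wp) s0 n).2
          (PySem.Set.ofList (wgOrbitL (PySem.Set.ofList wp) s0 n)) =
        (false, some (PySem.Set.len (PySem.Set.ofList
          ((PySem.Set.ofList (wgOrbitL (PySem.Set.ofList wp) s0 N)).map Prod.fst)))) := by
  intro fuel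
  induction fuel with
  | zero => intro n h1 h2; omega
  | succ fuel ih =>
      intro n h1 h2
      rw [wgLoopA_succ]
      by_cases hn : n = N
      · subst hn; rw [hN]; simp
      · have hnN : n < N := by omega
        have hmem : wgOrbit (PySem.Set.ofList wp) s0 n ∉
            PySem.Set.ofList (wgOrbitL (PySem.Set.ofList wp) s0 n) := by
          rw [PySem.Set.mem_ofList]
          intro hm
          obtain ⟨k, hk, hkeq⟩ := List.mem_map.1 hm
          exact hnr k n (List.mem_range.1 hk) hnN hkeq
        rw [hpre n hnN, if_pos rfl, if_neg hmem, ← wgOrbit_succ,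
          show PySem.Set.add (PySem.Set.ofList (wgOrbitL (PySem.Set.ofList wp) s0 n))
              (wgOrbit (PySem.Set.ofList wp) s0 n) =
            PySem.Set.ofList (wgOrbitL (PySem.Set.ofList wp) s0 (n + 1)) from by
              rw [wgOrbitL_succ, PySem.Set.ofList_append_singleton]]
        exact ih (n + 1) (by omega) (by omega)

-- A's loop when the first repeated state is state number M.
theorem wgLoopA_loops (h w : Int) (wp : List (Int × Int)) (s0 : (Int × Int) × Int) (M : Nat)
    (hinb : ∀ k, k ≤ M → wgInb h w (wgOrbit (PySem.Set.ofList wp) s0 k) = true)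
    (hM : ∃ i, i < M ∧ wgOrbit (PySem.Set.ofList wp) s0 i = wgOrbit (PySem.Set.ofList wp) s0 M)
    (hmin : ∀ j, j < M → ¬ ∃ i, i < j ∧ wgOrbit (PySem.Set.ofList wp) s0 i = wgOrbit (PySem.Set.ofList wp) s0 j) :
    ∀ fuel n, n ≤ M → M - n < fuel →
      wgLoopA h w wp fuel (wgOrbit (PySem.Set.ofList wp) s0 n).1 (wgOrbit (PySem.Set.ofList wp) s0 n).2
          (PySem.Set.ofList (wgOrbitL (PySem.Set.ofList wp) s0 n)) = (true, none) := by
  intro fuel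
  induction fuel with
  | zero => intro n h1 h2; omega
  | succ fuel ih =>
      intro n h1 h2
      rw [wgLoopA_succ, hinb n h1, if_pos rfl]
      by_cases hn : n = M
      · subst hn
        obtain ⟨i, hiM, hieq⟩ := hM
        have hmem : wgOrbit (PySem.Set.ofList wp) s0 n ∈
            PySem.Set.ofList (wgOrbitL (PySem.Set.ofList wp) s0 n) := by
          rw [PySem.Set.mem_ofList]
          exact List.mem_map.2 ⟨i, List.mem_range.2 hiM, hieq⟩
        rw [if_pos hmem]
      · have hnM : n < M := by omega
        have hmem : wgOrbit (PySem.Set.ofList wp) s0 n ∉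
            PySem.Set.ofList (wgOrbitL (PySem.Set.ofList wp) s0 n) := by
          rw [PySem.Set.mem_ofList]
          intro hm
          obtain ⟨k, hk, hkeq⟩ := List.mem_map.1 hm
          exact hmin n hnM ⟨k, List.mem_range.1 hk, hkeq⟩
        rw [if_neg hmem, ← wgOrbit_succ,
          show PySem.Set.add (PySem.Set.ofList (wgOrbitL (PySem.Set.ofList wp) s0 n))
              (wgOrbit (PySem.Set.ofList wp) s0 n) =
            PySem.Set.ofList (wgOrbitL (PySem.Set.ofList wp) s0 (n + 1)) from by
              rw [wgOrbitL_succ, PySem.Set.ofList_append_singleton]]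
        exact ih (n + 1) (by omega) (by omega)

-- Floyd's loop returns false when no in-bounds repeat exists (the guard exits).
theorem wgFloyd_exit (h w : Int) (W : PySem.Set (Int × Int)) (s0 : (Int × Int) × Int)
    (hnoloop : ∀ i j, i < j → (∀ k, k < j → wgInb h w (wgOrbit W s0 k) = true) →
      wgOrbit W s0 i ≠ wgOrbit W s0 j) :
    ∀ fuel n, (∀ k, k ≤ 2 * n → wgInb h w (wgOrbit W s0 k) = true) →
      wgFloyd h w W fuel (wgOrbit W s0 n) (wgOrbit W s0 (2 * n)) = false := by
  intro fuel
  induction fuel with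
  | zero => intro n _; rfl
  | succ fuel ih =>
      intro n hinv
      have e1 : wgStep W (wgOrbit W s0 (2 * n)) = wgOrbit W s0 (2 * n + 1) :=
        (wgOrbit_succ W s0 (2 * n)).symm
      have e2 : wgStep W (wgOrbit W s0 (2 * n + 1)) = wgOrbit W s0 (2 * n + 2) :=
        (wgOrbit_succ W s0 (2 * n + 1)).symm
      have e3 : wgStep W (wgOrbit W s0 n) = wgOrbit W s0 (n + 1) :=
        (wgOrbit_succ W s0 n).symm
      simp only [wgFloyd, e1, e2, e3]
      by_cases hb1 : wgInb h w (wgOrbit W s0 (2 * n + 1)) = true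
      · by_cases hb2 : wgInb h w (wgOrbit W s0 (2 * n + 2)) = true
        · have hne : wgOrbit W s0 (n + 1) ≠ wgOrbit W s0 (2 * n + 2) := by
            apply hnoloop (n + 1) (2 * n + 2) (by omega)
            intro k hk
            rcases Nat.lt_or_ge k (2 * n + 1) with hk2 | hk2
            · exact hinv k (by omega)
            · have : k = 2 * n + 1 := by omega
              rw [this]; exact hb1
          rw [hb1, if_pos rfl, hb2, if_pos rfl, if_neg hne]
          have h2n : 2 * n + 2 = 2 * (n + 1) := by ring
          rw [h2n]
          apply ih (n + 1)
          intro k hk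
          rcases Nat.lt_or_ge k (2 * n + 1) with hk2 | hk2
          · exact hinv k (by omega)
          · rcases Nat.lt_or_ge k (2 * n + 2) with hk3 | hk3
            · have : k = 2 * n + 1 := by omega
              rw [this]; exact hb1
            · have : k = 2 * n + 2 := by omega
              rw [this]; exact hb2
        · simp [hb1, Bool.of_not_eq_true hb2]
      · simp [Bool.of_not_eq_true hb1]

-- Floyd's loop returns true when the guard never exits: tortoise and hare meet.
theorem wgFloyd_meet (h w : Int) (W : PySem.Set (Int × Int)) (s0 : (Int × Int) × Int) (M : Nat)
    (hL : ∀ n, wgInb h w (wgOrbit W s0 n) = true)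
    (hMeq : wgOrbit W s0 M = wgOrbit W s0 (2 * M)) :
    ∀ fuel n, n < M → M ≤ n + fuel →
      wgFloyd h w W fuel (wgOrbit W s0 n) (wgOrbit W s0 (2 * n)) = true := by
  intro fuel
  induction fuel with
  | zero => intro n h1 h2; omega
  | succ fuel ih =>
      intro n h1 h2
      have e1 : wgStep W (wgOrbit W s0 (2 * n)) = wgOrbit W s0 (2 * n + 1) :=
        (wgOrbit_succ W s0 (2 * n)).symm
      have e2 : wgStep W (wgOrbit W s0 (2 * n + 1)) = wgOrbit W s0 (2 * n + 2) :=
        (wgOrbit_succ W s0 (2 * n + 1)).symm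
      have e3 : wgStep W (wgOrbit W s0 n) = wgOrbit W s0 (n + 1) :=
        (wgOrbit_succ W s0 n).symm
      simp only [wgFloyd, e1, e2, e3, hL (2 * n + 1), hL (2 * n + 2), if_true]
      by_cases hc : wgOrbit W s0 (n + 1) = wgOrbit W s0 (2 * n + 2)
      · rw [if_pos hc]
      · rw [if_neg hc]
        have hnM : n + 1 ≠ M := by
          intro hEq
          apply hc
          have : 2 * n + 2 = 2 * M := by omega
          rw [hEq, this]; exact hMeq
        have h2n : 2 * n + 2 = 2 * (n + 1) := by ring
        rw [h2n]
        exact ih (n + 1) (by omega) (by omega)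

-- A meeting point for Floyd exists whenever some state repeats: the first multiple of the
-- period past the start of the cycle.
theorem wgMeet_exists (W : PySem.Set (Int × Int)) (s0 : (Int × Int) × Int) (i j : Nat)
    (hij : i < j) (heq : wgOrbit W s0 i = wgOrbit W s0 j) :
    ∃ M, 1 ≤ M ∧ M ≤ j ∧ wgOrbit W s0 M = wgOrbit W s0 (2 * M) := by
  have hp : 0 < j - i := by omega
  have hmod := Nat.mod_lt i hp
  have hdm := Nat.div_add_mod i (j - i)
  have hmul : (j - i) * (i / (j - i) + 1) = (j - i) * (i / (j - i)) + (j - i) := by ring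
  refine ⟨(j - i) * (i / (j - i) + 1), by omega, by omega, ?_⟩
  have h2 : 2 * ((j - i) * (i / (j - i) + 1)) =
      (j - i) * (i / (j - i) + 1) + (i / (j - i) + 1) * (j - i) := by ring
  rw [h2, wgOrbit_period_mul W s0 i j hij heq (i / (j - i) + 1)
    ((j - i) * (i / (j - i) + 1)) (by omega)]

-- B's counting walk.
theorem wgCount_run (h w : Int) (W : PySem.Set (Int × Int)) (s0 : (Int × Int) × Int) (N : Nat)
    (hN : wgInb h w (wgOrbit W s0 N) = false) :
    ∀ fuel n, n ≤ N → N - n < fuel → (∀ k, k < N → wgInb h w (wgOrbit W s0 k) = true) →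
      wgCount h w W fuel (wgOrbit W s0 n) (PySem.Set.ofList ((wgOrbitL W s0 n).map Prod.fst)) =
        (false, some (PySem.Set.len (PySem.Set.ofList ((wgOrbitL W s0 N).map Prod.fst)))) := by
  intro fuel
  induction fuel with
  | zero => intro n h1 h2 _; omega
  | succ fuel ih =>
      intro n h1 h2 hpre
      simp only [wgCount]
      by_cases hn : n = N
      · subst hn; rw [hN]; simp
      · have hnN : n < N := by omega
        rw [hpre n hnN, if_pos rfl, ← wgOrbit_succ,
          show PySem.Set.add (PySem.Set.ofList ((wgOrbitL W s0 n).map Prod.fst))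
              (wgOrbit W s0 n).1 =
            PySem.Set.ofList ((wgOrbitL W s0 (n + 1)).map Prod.fst) from by
              rw [wgOrbitL_succ, List.map_append, List.map_singleton,
                PySem.Set.ofList_append_singleton]]
        exact ih (n + 1) (by omega) (by omega) hpre

-- A counts positions of the deduplicated state list, B deduplicates positions directly:
-- both sets have the same members, hence the same size.
theorem wgCount_eq (l : List ((Int × Int) × Int)) :
    PySem.Set.len (PySem.Set.ofList ((PySem.Set.ofList l).map Prod.fst)) =
      PySem.Set.len (PySem.Set.ofList (l.map Prod.fst)) := by
  have hmem : ∀ x, x ∈ PySem.Set.ofList ((PySem.Set.ofList l).map Prod.fst) ↔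
      x ∈ PySem.Set.ofList (l.map Prod.fst) := by
    intro x
    simp [PySem.Set.mem_ofList, List.mem_map]
  have hperm := (List.perm_ext_iff_of_nodup (PySem.Set.nodup_ofList _)
    (PySem.Set.nodup_ofList _)).2 hmem
  simp [PySem.Set.len, hperm.length_eq]

theorem walkGuard_eq (h w : Int) (wp : List (Int × Int)) (g : Int × Int) :
    walkGuard h w wp g = walkGuard_alt h w wp g := by
  by_cases hL : ∀ n, wgInb h w (wgOrbit (PySem.Set.ofList wp) (g, 0) n) = true
  · -- the guard never leaves the board: a state repeats, both sides answer (true, none)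
    have hs : wgInb h w ((g, 0) : (Int × Int) × Int) = true := hL 0
    have hsb : 0 ≤ g.1 ∧ g.1 < h ∧ 0 ≤ g.2 ∧ g.2 < w := by simpa [wgInb] using hs
    have hh : 0 < h := by omega
    have hw : 0 < w := by omega
    obtain ⟨i, j, hij, hjK, heq⟩ := wgExists_repeat h w (PySem.Set.ofList wp) g hL
    have hPex : ∃ jj, ∃ ii, ii < jj ∧
        wgOrbit (PySem.Set.ofList wp) (g, 0) ii = wgOrbit (PySem.Set.ofList wp) (g, 0) jj :=
      ⟨j, i, hij, heq⟩
    have hMle : Nat.find hPex ≤ j := Nat.find_min' hPex ⟨i, hij, heq⟩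
    have hfuel := wgFuel_ge h w hh hw
    have hA : walkGuard h w wp g = (true, none) := by
      unfold walkGuard
      exact wgLoopA_loops h w wp (g, 0) (Nat.find hPex) (fun k _ => hL k)
        (Nat.find_spec hPex) (fun jj hjj => Nat.find_min hPex hjj)
        ((4 * h * w).toNat + 2) 0 (Nat.zero_le _) (by omega)
    have hB : walkGuard_alt h w wp g = (true, none) := by
      obtain ⟨M', hM'1, hM'le, hM'eq⟩ := wgMeet_exists (PySem.Set.ofList wp) (g, 0) i j hij heq
      have hf : wgFloyd h w (PySem.Set.ofList wp) ((4 * h * w).toNat + 2) (g, 0) (g, 0) = true :=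
        wgFloyd_meet h w (PySem.Set.ofList wp) (g, 0) M' hL hM'eq
          ((4 * h * w).toNat + 2) 0 (by omega) (by omega)
      simp only [walkGuard_alt, hs, hf, if_true]
    rw [hA, hB]
  · -- the guard exits: both sides count the distinct visited cells
    push Not at hL
    have hex : ∃ n, wgInb h w (wgOrbit (PySem.Set.ofList wp) (g, 0) n) = false := by
      obtain ⟨n, hn⟩ := hL
      exact ⟨n, by simpa using hn⟩
    have hN := Nat.find_spec hex
    have hpre : ∀ k, k < Nat.find hex →
        wgInb h w (wgOrbit (PySem.Set.ofList wp) (g, 0) k) = true := by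
      intro k hk
      have := Nat.find_min hex hk
      simpa using this
    have hnoloop : ∀ i j, i < j →
        (∀ k, k < j → wgInb h w (wgOrbit (PySem.Set.ofList wp) (g, 0) k) = true) →
        wgOrbit (PySem.Set.ofList wp) (g, 0) i ≠ wgOrbit (PySem.Set.ofList wp) (g, 0) j := by
      intro i j hij hall hEq
      have := wgLoops_of_repeat h w (PySem.Set.ofList wp) (g, 0) i j hij hEq hall (Nat.find hex)
      rw [hN] at this
      cases this
    have hnr : ∀ i j, i < j → j < Nat.find hex →
        wgOrbit (PySem.Set.ofList wp) (g, 0) i ≠ wgOrbit (PySem.Set.ofList wp) (g, 0) j :=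
      fun i j hij hjN => hnoloop i j hij (fun k hk => hpre k (by omega))
    have hNF : Nat.find hex < (4 * h * w).toNat + 2 := by
      rcases Nat.eq_zero_or_pos (Nat.find hex) with h0 | h0
      · omega
      · have hin0 := hpre 0 h0
        have hsb : 0 ≤ g.1 ∧ g.1 < h ∧ 0 ≤ g.2 ∧ g.2 < w := by simpa [wgInb] using hin0
        have hh : 0 < h := by omega
        have hw : 0 < w := by omega
        have hb := wgExit_bound h w (PySem.Set.ofList wp) g (Nat.find hex) hpre hnr
        have := wgFuel_ge h w hh hw
        omega
    have hA : walkGuard h w wp g = (false, some (PySem.Set.len (PySem.Set.ofList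
        ((PySem.Set.ofList (wgOrbitL (PySem.Set.ofList wp) (g, 0) (Nat.find hex))).map Prod.fst)))) := by
      unfold walkGuard
      exact wgLoopA_exit h w wp (g, 0) (Nat.find hex) hN hpre hnr
        ((4 * h * w).toNat + 2) 0 (Nat.zero_le _) (by omega)
    rw [hA, wgCount_eq]
    have hBcount : wgCount h w (PySem.Set.ofList wp) ((4 * h * w).toNat + 2) (g, 0)
        PySem.Set.empty = (false, some (PySem.Set.len (PySem.Set.ofList
          ((wgOrbitL (PySem.Set.ofList wp) (g, 0) (Nat.find hex)).map Prod.fst)))) :=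
      wgCount_run h w (PySem.Set.ofList wp) (g, 0) (Nat.find hex) hN
        ((4 * h * w).toNat + 2) 0 (Nat.zero_le _) (by omega) hpre
    by_cases hs : wgInb h w ((g, 0) : (Int × Int) × Int) = true
    · have hf : wgFloyd h w (PySem.Set.ofList wp) ((4 * h * w).toNat + 2) (g, 0) (g, 0) = false :=
        wgFloyd_exit h w (PySem.Set.ofList wp) (g, 0) hnoloop ((4 * h * w).toNat + 2) 0
          (fun k hk => by
            have hk0 : k = 0 := by omega
            rw [hk0]; exact hs)
      simp only [walkGuard_alt, hs, hf, if_true, Bool.false_eq_true, if_false, hBcount]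
    · have hs' : wgInb h w ((g, 0) : (Int × Int) × Int) = false := by simpa using hs
      simp only [walkGuard_alt, hs', Bool.false_eq_true, if_false, hBcount]

-- ===== VERDICT (by name: the statement is the Claim_ definition above) =====
theorem walkGuard_spec : Claim_equal_walkGuard := by
  intro h w wp g _
  unfold Spec_walkGuard
  exact walkGuard_eq h w wp g
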